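-- pv_equiv track=rewrite | github.com/Arsen1302/Code-copy-detector | TestData/solutions/problem_969_4.py | solution_969_4
-- ===== SOURCE A (Python) =====
-- from typing import List
--
-- def solution_969_4(n: int) -> List[str]:
--     ans = []
--     stack = [(0, 1, 1, 1)]
--     while stack:
--         px, pd, x, d = stack.pop()
--         cx = px + x # mediant
--         cd = pd + d
--         if cd <= n:
--             stack.append((cx, cd, x, d))
--             stack.append((px, pd, cx, cd))
--             ans.append(f"{cx}/{cd}")
--     return ans
-- ===== SOURCE B (Python) =====
-- from typing import List
--
-- def solution_969_4(n: int) -> List[str]: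
--     def go(a: int, b: int, c: int, d: int) -> List[str]:
--         cx, cd = a + c, b + d
--         if cd > n:
--             return []
--         return [f"{cx}/{cd}"] + go(a, b, cx, cd) + go(cx, cd, c, d)
--     return go(0, 1, 1, 1)
-- ===== Notes on version B (the rewrite author's own statement) =====
-- stated objective: simpler
-- what changed: B replaces A's explicit stack and while-loop with a direct recursion on the Stern-Brocot subtree (node, then left subtree, then right subtree), which yields the same preorder list without managing a worklist.
import Mathlib
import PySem

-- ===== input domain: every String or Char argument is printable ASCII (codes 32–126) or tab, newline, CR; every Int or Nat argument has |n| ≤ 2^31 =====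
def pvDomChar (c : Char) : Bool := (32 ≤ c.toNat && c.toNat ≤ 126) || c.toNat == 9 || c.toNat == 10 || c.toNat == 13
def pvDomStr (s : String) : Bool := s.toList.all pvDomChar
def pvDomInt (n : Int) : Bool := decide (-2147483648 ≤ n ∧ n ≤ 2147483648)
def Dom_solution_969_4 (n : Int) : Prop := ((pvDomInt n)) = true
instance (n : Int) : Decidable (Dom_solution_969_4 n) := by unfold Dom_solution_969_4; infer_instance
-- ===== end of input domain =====

-- B replaces A's explicit stack with a direct recursion on the Stern–Brocot subtree (simpler); return value only, no mutation.

-- ===== PORT A =====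
-- A's while-stack loop, fueled for totality (the fuel 3^(n-1)+1 is proved sufficient below);
-- the Python list used as a stack is represented head-as-top (append/pop at the top).
def loopA (n : Int) : Nat → List (Int × Int × Int × Int) → List String → List String
  | 0, _, ans => ans
  | _ + 1, [], ans => ans
  | f + 1, (px, pd, x, d) :: stack, ans =>
    let cx := px + x
    let cd := pd + d
    if cd ≤ n then
      loopA n f ((px, pd, cx, cd) :: (cx, cd, x, d) :: stack)
        (ans ++ [PySem.Int.toStr cx ++ "/" ++ PySem.Int.toStr cd])
    else
      loopA n f stack ans

def solution_969_4 (n : Int) : List String :=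
  loopA n (3 ^ (n - 1).toNat + 1) [(0, 1, 1, 1)] []

-- ===== PORT B =====
-- B's recursive go, fueled for totality (depth ≤ n, fuel n.toNat+1 suffices, proved below).
def goB (n : Int) : Nat → Int → Int → Int → Int → List String
  | 0, _, _, _, _ => []
  | f + 1, a, b, c, d =>
    let cx := a + c
    let cd := b + d
    if cd > n then []
    else (PySem.Int.toStr cx ++ "/" ++ PySem.Int.toStr cd) :: (goB n f a b cx cd ++ goB n f cx cd c d)

def solution_969_4_alt (n : Int) : List String :=
  goB n (n.toNat + 1) 0 1 1 1

-- ===== PRECONDITION & SPEC =====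
def Spec_solution_969_4 (n : Int) (out : List String) : Prop := out = solution_969_4_alt n
instance (n : Int) (out : List String) : Decidable (Spec_solution_969_4 n out) := by unfold Spec_solution_969_4; infer_instance

-- ===== CLAIM (what is proved, stated in full; the proofs are below) =====
def Claim_equal_solution_969_4 : Prop := ∀ (n : Int), Dom_solution_969_4 n → Spec_solution_969_4 n (solution_969_4 n)

-- ===== LEMMAS AND PROOFS =====

-- goB is independent of the fuel once the fuel exceeds the height n+1-(b+d) of the subtree.
theorem goB_fuel (n : Int) (f f' : Nat) (a b c d : Int) (hb : 1 ≤ b) (hd : 1 ≤ d)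
    (hf : (n + 1 - (b + d)).toNat < f) (hf' : (n + 1 - (b + d)).toNat < f') :
    goB n f a b c d = goB n f' a b c d := by
  induction f generalizing f' a b c d with
  | zero => omega
  | succ f ih =>
    cases f' with
    | zero => omega
    | succ f' =>
      simp only [goB]
      by_cases h : b + d > n
      · simp [h]
      · simp only [if_neg h]
        rw [ih f' a b (a + c) (b + d) hb (by omega) (by omega) (by omega),
            ih f' (a + c) (b + d) c d (by omega) hd (by omega) (by omega)]

theorem goB_succ (n : Int) (f : Nat) (a b c d : Int) :
    goB n (f + 1) a b c d
      = if b + d > n then []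
        else (PySem.Int.toStr (a + c) ++ "/" ++ PySem.Int.toStr (b + d))
          :: (goB n f a b (a + c) (b + d) ++ goB n f (a + c) (b + d) c d) := rfl

-- cost of one stack entry: an upper bound on the number of loop iterations it generates
def costE (n : Int) (e : Int × Int × Int × Int) : Nat := 3 ^ (n + 1 - (e.2.1 + e.2.2.2)).toNat

def costS (n : Int) (s : List (Int × Int × Int × Int)) : Nat := (s.map (costE n)).sum

def okE (e : Int × Int × Int × Int) : Prop := 1 ≤ e.2.1 ∧ 1 ≤ e.2.2.2

-- Main invariant: with enough fuel, the loop appends, for each stack entry in pop order,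
-- exactly B's preorder of that entry's subtree.
theorem loopA_eq (n : Int) (f : Nat) (stack : List (Int × Int × Int × Int)) (ans : List String)
    (hok : ∀ e ∈ stack, okE e) (hf : costS n stack ≤ f) :
    loopA n f stack ans
      = ans ++ (stack.map (fun e => goB n (n.toNat + 1) e.1 e.2.1 e.2.2.1 e.2.2.2)).flatten := by
  induction f generalizing stack ans with
  | zero =>
    cases stack with
    | nil => simp [loopA]
    | cons e s =>
      exfalso
      have h1 : 1 ≤ costE n e := Nat.one_le_pow _ _ (by omega)
      simp only [costS, List.map_cons, List.sum_cons] at hf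
      have : costE n e = 3 ^ (n + 1 - (e.2.1 + e.2.2.2)).toNat := rfl
      omega
  | succ f ih =>
    cases stack with
    | nil => simp [loopA]
    | cons e s =>
      obtain ⟨px, pd, x, d⟩ := e
      have hpd : 1 ≤ pd := (hok (px, pd, x, d) (by simp)).1
      have hd : 1 ≤ d := (hok (px, pd, x, d) (by simp)).2
      have hcost : costS n ((px, pd, x, d) :: s) = 3 ^ (n + 1 - (pd + d)).toNat + costS n s := by
        simp [costS, costE]
      by_cases h : pd + d ≤ n
      · have hk : 1 ≤ (n + 1 - (pd + d)).toNat := by omega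
        have hL : (n + 1 - (pd + (pd + d))).toNat < (n + 1 - (pd + d)).toNat := by omega
        have hR : (n + 1 - ((pd + d) + d)).toNat < (n + 1 - (pd + d)).toNat := by omega
        have hpowL : costE n (px, pd, px + x, pd + d) ≤ 3 ^ ((n + 1 - (pd + d)).toNat - 1) :=
          Nat.pow_le_pow_right (by omega) (by simp only [costE]; omega)
        have hpowR : costE n (px + x, pd + d, x, d) ≤ 3 ^ ((n + 1 - (pd + d)).toNat - 1) :=
          Nat.pow_le_pow_right (by omega) (by simp only [costE]; omega)
        have h3 : 3 ^ ((n + 1 - (pd + d)).toNat - 1) + 3 ^ ((n + 1 - (pd + d)).toNat - 1) + 1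
            ≤ 3 ^ (n + 1 - (pd + d)).toNat := by
          have : 3 ^ (n + 1 - (pd + d)).toNat = 3 ^ ((n + 1 - (pd + d)).toNat - 1) * 3 := by
            rw [← pow_succ]; congr 1; omega
          have h1 : 1 ≤ 3 ^ ((n + 1 - (pd + d)).toNat - 1) := Nat.one_le_pow _ _ (by omega)
          omega
        have hf' : costS n ((px, pd, px + x, pd + d) :: (px + x, pd + d, x, d) :: s) ≤ f := by
          simp only [costS, List.map_cons, List.sum_cons] at *
          omega
        have hok' : ∀ e ∈ (px, pd, px + x, pd + d) :: (px + x, pd + d, x, d) :: s, okE e := by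
          intro e he
          simp only [List.mem_cons] at he
          rcases he with rfl | rfl | he
          · exact ⟨hpd, show (1 : Int) ≤ pd + d from by omega⟩
          · exact ⟨show (1 : Int) ≤ pd + d from by omega, hd⟩
          · exact hok _ (List.mem_cons_of_mem _ he)
        rw [loopA, if_pos h, ih _ _ hok' hf']
        -- unfold goB once at the head entry
        have hgo : goB n (n.toNat + 1) px pd x d
            = (PySem.Int.toStr (px + x) ++ "/" ++ PySem.Int.toStr (pd + d))
              :: (goB n (n.toNat + 1) px pd (px + x) (pd + d)
                  ++ goB n (n.toNat + 1) (px + x) (pd + d) x d) := by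
          rw [goB_succ, if_neg (by omega : ¬ pd + d > n)]
          rw [goB_fuel n n.toNat (n.toNat + 1) px pd (px + x) (pd + d) hpd (by omega)
                (by omega) (by omega),
              goB_fuel n n.toNat (n.toNat + 1) (px + x) (pd + d) x d (by omega) hd
                (by omega) (by omega)]
      
        simp [hgo]
      · have hf' : costS n s ≤ f := by
          have h1 : 1 ≤ 3 ^ (n + 1 - (pd + d)).toNat := Nat.one_le_pow _ _ (by omega)
          omega
        rw [loopA, if_neg h, ih _ _ (fun e he => hok _ (List.mem_cons_of_mem _ he)) hf']
        have : goB n (n.toNat + 1) px pd x d = [] := by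
          simp [goB, h]
        simp [this]

-- ===== VERDICT (by name: the statement is the Claim_ definition above) =====
theorem solution_969_4_spec : Claim_equal_solution_969_4 := by
  intro n _
  show solution_969_4 n = solution_969_4_alt n
  unfold solution_969_4 solution_969_4_alt
  rw [loopA_eq n _ _ _ (by intro e he; simp at he; subst he; exact ⟨le_refl 1, le_refl 1⟩)
        (by simp only [costS, costE, List.map_cons, List.map_nil, List.sum_cons, List.sum_nil]
            have h2 : (1 : Int) + 1 = 2 := rfl
            have : n + 1 - ((1 : Int) + 1) = n - 1 := by ring
            rw [this]; omega)]
  simp
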